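-- pv_equiv track=rewrite | github.com/hishamnasrallah/hishamAIAgentOS | apps/agents/specialized/performance_agent.py | _extract_optimizations
-- ===== SOURCE A (Python) =====
-- from typing import Dict, Any, List
--
-- def _extract_optimizations(response: str) -> List[Dict[str, Any]]:
--     """Extract optimization recommendations from response."""
--     optimizations = []
--     current_opt = {}
--
--     lines = response.split('\n')
--     for line in lines:
--         line = line.strip()
--
--         if line.startswith('**') and 'Optimization' in line:
--             if current_opt:
--                 optimizations.append(current_opt)
--             current_opt = {'title': line.strip('*').strip()}
--         elif 'Impact:' in line:
--             current_opt['impact'] = line.split('Impact:')[-1].strip()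
--         elif 'Effort:' in line:
--             current_opt['effort'] = line.split('Effort:')[-1].strip()
--
--     if current_opt:
--         optimizations.append(current_opt)
--
--     return optimizations
-- ===== SOURCE B (Python) =====
-- # B: two-phase parse — first partition the stripped lines into header-delimited
-- # segments, then build one dict per segment and keep the non-empty ones.
--
-- def _is_header(line):
--     return line.startswith('**') and 'Optimization' in line
--
--
-- def _segments(lines):
--     """Partition lines into (title, body) segments; leading lines get title None."""
--     segs = []
--     title, body = None, []
--     for line in lines:
--         if _is_header(line):
--             segs.append((title, body))
--             title, body = line, []
--         else:
--             body.append(line)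
--     segs.append((title, body))
--     return segs
--
--
-- def _build(title, body):
--     d = {}
--     if title is not None:
--         d['title'] = title.strip('*').strip()
--     for line in body:
--         if 'Impact:' in line:
--             d['impact'] = line.split('Impact:')[-1].strip()
--         elif 'Effort:' in line:
--             d['effort'] = line.split('Effort:')[-1].strip()
--     return d
--
--
-- def _extract_optimizations(response):
--     lines = [l.strip() for l in response.split('\n')]
--     out = []
--     for title, body in _segments(lines):
--         d = _build(title, body)
--         if d:
--             out.append(d)
--     return out
-- ===== Notes on version B (the rewrite author's own statement) =====
-- stated objective: alternative
-- what changed: Replaces A's single-pass fold with a flush-on-header mutable current dict by a two-phase decomposition: partition the stripped lines into header-delimited (title, body) segments, then build one dict per segment and keep the non-empty ones.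
import Mathlib
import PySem

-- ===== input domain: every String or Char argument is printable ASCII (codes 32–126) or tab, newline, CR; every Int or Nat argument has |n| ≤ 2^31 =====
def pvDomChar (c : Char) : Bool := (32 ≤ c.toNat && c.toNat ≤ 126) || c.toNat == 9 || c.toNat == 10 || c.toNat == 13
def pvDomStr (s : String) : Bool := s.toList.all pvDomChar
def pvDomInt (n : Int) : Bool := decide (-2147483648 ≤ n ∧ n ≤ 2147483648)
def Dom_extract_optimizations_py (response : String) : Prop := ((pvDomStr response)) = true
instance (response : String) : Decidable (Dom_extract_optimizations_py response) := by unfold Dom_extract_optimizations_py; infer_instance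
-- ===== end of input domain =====

-- B replaces A's flush-on-header fold with a two-phase decomposition: partition into
-- header-delimited (title, body) segments, then build one dict per segment (alternative, same cost).

-- shared helpers (the same Python expressions occur in both sources)
def pvHdr (l : String) : Bool := PySem.Str.startswith l "**" && PySem.Str.isIn "Optimization" l

def pvTitle (l : String) : String := PySem.Str.strip (PySem.Str.stripChars l "*")

-- line.split(sep)[-1].strip()
def pvAfterLast (l sep : String) : String :=
  PySem.Str.strip (((PySem.Str.split? l sep).getD [l]).getLastD l)

-- the "if 'Impact:' in line … elif 'Effort:' in line …" chain (verbatim in both sources)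
def pvUpd (cur : PySem.Dict String String) (line : String) : PySem.Dict String String :=
  if PySem.Str.isIn "Impact:" line then cur.insert "impact" (pvAfterLast line "Impact:")
  else if PySem.Str.isIn "Effort:" line then cur.insert "effort" (pvAfterLast line "Effort:")
  else cur

-- ===== PORT A =====
-- 'if current_opt: optimizations.append(current_opt)'
def pvFlush (st : List (List (String × String)) × PySem.Dict String String) :
    List (List (String × String)) :=
  if st.2.items.isEmpty then st.1 else st.1 ++ [st.2.items]

def pvStepA (st : List (List (String × String)) × PySem.Dict String String) (line : String) :
    List (List (String × String)) × PySem.Dict String String :=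
  if pvHdr line then (pvFlush st, PySem.Dict.empty.insert "title" (pvTitle line))
  else (st.1, pvUpd st.2 line)

def extract_optimizations_py (response : String) : List (List (String × String)) :=
  let lines := (PySem.Str.split? response "\n").getD [response]
  let st := lines.foldl (fun st line0 => pvStepA st (PySem.Str.strip line0))
      ([], PySem.Dict.empty)
  pvFlush st

-- ===== PORT B =====
-- _segments(lines)
def pvSegStep (st : List (Option String × List String) × (Option String × List String))
    (line : String) : List (Option String × List String) × (Option String × List String) :=
  if pvHdr line then (st.1 ++ [st.2], (some line, []))
  else (st.1, (st.2.1, st.2.2 ++ [line]))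

def pvSegments (lines : List String) : List (Option String × List String) :=
  let st := lines.foldl pvSegStep ([], (none, []))
  st.1 ++ [st.2]

-- _build(title, body)
def pvBuild (title : Option String) (body : List String) : PySem.Dict String String :=
  let d : PySem.Dict String String :=
    match title with
    | some t => PySem.Dict.empty.insert "title" (pvTitle t)
    | none => PySem.Dict.empty
  body.foldl pvUpd d

def extract_optimizations_py_alt (response : String) : List (List (String × String)) :=
  let lines := ((PySem.Str.split? response "\n").getD [response]).map PySem.Str.strip
  (pvSegments lines).foldl
    (fun out s =>
      let d := pvBuild s.1 s.2
      if d.items.isEmpty then out else out ++ [d.items]) []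

-- ===== PRECONDITION & SPEC =====
def Spec_extract_optimizations_py (response : String) (out : List (List (String × String))) : Prop := out = extract_optimizations_py_alt response
instance (response : String) (out : List (List (String × String))) : Decidable (Spec_extract_optimizations_py response out) := by unfold Spec_extract_optimizations_py; infer_instance

-- ===== CLAIM (what is proved, stated in full; the proofs are below) =====
def Claim_equal_extract_optimizations_py : Prop := ∀ (response : String), Dom_extract_optimizations_py response → Spec_extract_optimizations_py response (extract_optimizations_py response)

-- ===== LEMMAS AND PROOFS =====

def pvEmit (d : PySem.Dict String String) : List (List (String × String)) :=
  if d.items.isEmpty then [] else [d.items]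

def pvProc (s : Option String × List String) : List (List (String × String)) :=
  pvEmit (pvBuild s.1 s.2)

-- A's fold, characterized recursively over (already stripped) lines
def pvRunA (cur : PySem.Dict String String) : List String → List (List (String × String))
  | [] => pvEmit cur
  | l :: rest =>
    if pvHdr l then pvEmit cur ++ pvRunA (PySem.Dict.empty.insert "title" (pvTitle l)) rest
    else pvRunA (pvUpd cur l) rest

theorem pvL1 (ls : List String) (opts : List (List (String × String)))
    (cur : PySem.Dict String String) :
    pvFlush (ls.foldl pvStepA (opts, cur)) = opts ++ pvRunA cur ls := by
  induction ls generalizing opts cur with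
  | nil => simp only [List.foldl_nil, pvRunA, pvFlush, pvEmit]; split <;> simp
  | cons l rest ih =>
    simp only [List.foldl_cons, pvRunA, pvStepA]
    by_cases h : pvHdr l = true
    · simp only [h, if_pos]
      rw [ih]
      simp only [pvFlush, pvEmit]
      split <;> simp
    · simp only [h, Bool.false_eq_true, if_false]
      rw [ih]

-- segment processing, characterized recursively over the remaining lines
def pvRunB (t : Option String) (b : List String) : List String → List (List (String × String))
  | [] => pvProc (t, b)
  | l :: rest =>
    if pvHdr l then pvProc (t, b) ++ pvRunB (some l) [] rest
    else pvRunB t (b ++ [l]) rest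

-- B's per-segment output fold equals acc ++ flatMap pvProc
theorem pvFin (L : List (Option String × List String))
    (acc : List (List (String × String))) :
    L.foldl (fun out s =>
      let d := pvBuild s.1 s.2
      if d.items.isEmpty then out else out ++ [d.items]) acc
      = acc ++ L.flatMap pvProc := by
  induction L generalizing acc with
  | nil => simp
  | cons s rest ih =>
    simp only [List.foldl_cons, List.flatMap_cons, ih, pvProc, pvEmit]
    split <;> simp

-- B's segment fold, flattened, equals the recursive pvRunB
theorem pvSegRun (ls : List String) (segs : List (Option String × List String))
    (t : Option String) (b : List String) :
    (let st := ls.foldl pvSegStep (segs, (t, b)); (st.1 ++ [st.2]).flatMap pvProc)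
      = segs.flatMap pvProc ++ pvRunB t b ls := by
  induction ls generalizing segs t b with
  | nil => simp [pvRunB]
  | cons l rest ih =>
    simp only [List.foldl_cons, pvSegStep, pvRunB]
    by_cases h : pvHdr l = true
    · simp only [h, if_pos]
      rw [ih]
      simp
    · simp only [h, Bool.false_eq_true, if_false]
      rw [ih]

-- the two recursions agree: pvRunB carries the segment, pvRunA carries its built dict
theorem pvAB (ls : List String) : ∀ (t : Option String) (b : List String),
    pvRunB t b ls = pvRunA (pvBuild t b) ls := by
  induction ls with
  | nil => intro t b; rfl
  | cons l rest ih =>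
    intro t b
    simp only [pvRunB, pvRunA]
    by_cases h : pvHdr l = true
    · simp only [h, if_pos]
      rw [ih (some l) []]
      rfl
    · simp only [h, Bool.false_eq_true, if_false]
      rw [ih t (b ++ [l])]
      have : pvBuild t (b ++ [l]) = pvUpd (pvBuild t b) l := by
        simp [pvBuild, List.foldl_append]
      rw [this]

-- ===== VERDICT (by name: the statement is the Claim_ definition above) =====
theorem extract_optimizations_py_spec : Claim_equal_extract_optimizations_py := by
  intro response _
  unfold Spec_extract_optimizations_py extract_optimizations_py extract_optimizations_py_alt
  set lines := ((PySem.Str.split? response "\n").getD [response]).map PySem.Str.strip with hl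
  have hfold : ((PySem.Str.split? response "\n").getD [response]).foldl
      (fun st line0 => pvStepA st (PySem.Str.strip line0)) ([], PySem.Dict.empty) =
      lines.foldl pvStepA ([], PySem.Dict.empty) := by
    rw [hl, List.foldl_map]
  simp only [hfold]
  rw [pvL1, List.nil_append]
  unfold pvSegments
  rw [pvFin, List.nil_append, pvSegRun, List.flatMap_nil, List.nil_append, pvAB]
  rfl
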